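-- pv_equiv track=rewrite | github.com/jayden-graneta/cp104 | ws/gran8740_l08/src/functions.py | list_categorize
-- ===== SOURCE A (Python) =====
-- def list_categorize(values):
--     """
--     -------------------------------------------------------
--     Returns data about the categories of values in a list.
--     Use: negatives, positives, zeroes, evens, odds = list_categorize(values)
--     -------------------------------------------------------
--     Parameters:
--         values - a list of values (list of int)
--     Returns:
--         negatives - the number of negative values (int)
--         positives - the number of positive values (int)
--         zeroes - the number of zeroes (int)
--         evens - the number of even values (int)
--         odds - the number of odd values (int)
--     -------------------------------------------------------
--     """
--     negatives = 0
--     positives = 0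
--     zeroes = 0
--     evens = 0
--     odd = 0
--     length = len(values)
--     n = 0
--
--     while n < length:
--         if values[n] < 0:
--             negatives += 1
--         elif values[n] > 0:
--             positives += 1
--         else:
--             zeroes += 1
--
--         if values[n] % 2 == 0:
--             evens += 1
--         else:
--             odd += 1
--         n += 1
--     return negatives, positives, zeroes, evens, odd
-- ===== SOURCE B (Python) =====
-- def list_categorize(values):
--     negatives = sum(1 for v in values if v < 0)
--     positives = sum(1 for v in values if v > 0)
--     zeroes = sum(1 for v in values if v == 0)
--     evens = sum(1 for v in values if v % 2 == 0)
--     odds = sum(1 for v in values if v % 2 != 0)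
--     return negatives, positives, zeroes, evens, odds
-- ===== Notes on version B (the rewrite author's own statement) =====
-- stated objective: idiomatic
-- what changed: Replaces the single index-driven while-loop carrying five counters with five independent generator-expression passes, one per category, returned in the same tuple order.
import Mathlib
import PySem

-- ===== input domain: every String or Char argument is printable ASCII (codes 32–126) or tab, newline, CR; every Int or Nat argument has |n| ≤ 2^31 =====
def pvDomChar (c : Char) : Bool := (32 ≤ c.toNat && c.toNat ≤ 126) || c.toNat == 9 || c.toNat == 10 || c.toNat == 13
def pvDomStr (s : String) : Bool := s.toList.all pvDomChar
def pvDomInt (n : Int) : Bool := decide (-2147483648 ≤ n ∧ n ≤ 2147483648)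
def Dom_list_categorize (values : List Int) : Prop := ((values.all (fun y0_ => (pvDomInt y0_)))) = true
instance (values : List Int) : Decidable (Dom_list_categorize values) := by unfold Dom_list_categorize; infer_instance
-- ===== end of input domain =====

-- B replaces A's single while-loop carrying five counters with five independent per-category counting passes (idiomatic; same cost).


-- ===== PORT A =====
-- Body of A's while-loop: the five counters updated for one element, branches in A's order.
def list_categorize_step (s : Int × Int × Int × Int × Int) (v : Int) : Int × Int × Int × Int × Int :=
  let (negatives, positives, zeroes, evens, odd) := s
  let (negatives, positives, zeroes) :=
    if v < 0 then (negatives + 1, positives, zeroes)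
    else if v > 0 then (negatives, positives + 1, zeroes)
    else (negatives, positives, zeroes + 1)
  if PySem.Int.mod v 2 == 0 then (negatives, positives, zeroes, evens + 1, odd)
  else (negatives, positives, zeroes, evens, odd + 1)

-- A's index-driven while-loop visits values[0..length-1] in order: a fold of the step over the list.
def list_categorize (values : List Int) : Int × Int × Int × Int × Int :=
  values.foldl list_categorize_step (0, 0, 0, 0, 0)

-- ===== PORT B =====
-- Five independent passes, one per category (Source B's five generator-expression sums).
def list_categorize_alt (values : List Int) : Int × Int × Int × Int × Int :=
  ((values.countP (fun v => v < 0) : Int),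
   (values.countP (fun v => v > 0) : Int),
   (values.countP (fun v => v == 0) : Int),
   (values.countP (fun v => PySem.Int.mod v 2 == 0) : Int),
   (values.countP (fun v => PySem.Int.mod v 2 != 0) : Int))

-- ===== PRECONDITION & SPEC =====
def Spec_list_categorize (values : List Int) (out : Int × Int × Int × Int × Int) : Prop := out = list_categorize_alt values
instance (values : List Int) (out : Int × Int × Int × Int × Int) : Decidable (Spec_list_categorize values out) := by unfold Spec_list_categorize; infer_instance

-- ===== CLAIM (what is proved, stated in full; the proofs are below) =====
def Claim_equal_list_categorize : Prop := ∀ (values : List Int), Dom_list_categorize values → Spec_list_categorize values (list_categorize values)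

-- ===== LEMMAS AND PROOFS =====
-- One step of A's loop in closed form: each counter gains 0 or 1 by its category test.
theorem list_categorize_step_eq (s : Int × Int × Int × Int × Int) (v : Int) :
    list_categorize_step s v =
      (s.1 + (if v < 0 then 1 else 0),
       s.2.1 + (if 0 < v then 1 else 0),
       s.2.2.1 + (if v = 0 then 1 else 0),
       s.2.2.2.1 + (if (2:Int) ∣ v then 1 else 0),
       s.2.2.2.2 + (if (2:Int) ∣ v then 0 else 1)) := by
  obtain ⟨a, b, c, d, e⟩ := s
  simp only [list_categorize_step, beq_iff_eq, PySem.Int.mod_eq_zero_iff_dvd]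
  split_ifs <;> simp_all <;> omega

-- Loop invariant: the fold from any start (a,b,c,d,e) adds the five category counts.
theorem list_categorize_fold (values : List Int) (a b c d e : Int) :
    values.foldl list_categorize_step (a, b, c, d, e) =
    (a + (values.countP (fun v => v < 0) : Int),
     b + (values.countP (fun v => v > 0) : Int),
     c + (values.countP (fun v => v == 0) : Int),
     d + (values.countP (fun v => PySem.Int.mod v 2 == 0) : Int),
     e + (values.countP (fun v => PySem.Int.mod v 2 != 0) : Int)) := by
  induction values generalizing a b c d e with
  | nil => simp
  | cons x xs ih =>
    rw [List.foldl_cons, list_categorize_step_eq, ih]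
    simp only [List.countP_cons, Prod.mk.injEq]
    clear ih
    refine ⟨?_, ?_, ?_, ?_, ?_⟩ <;> split_ifs <;> simp_all [beq_iff_eq, bne_iff_ne] <;> omega

-- ===== VERDICT (by name: the statement is the Claim_ definition above) =====
theorem list_categorize_spec : Claim_equal_list_categorize := by
  intro values _
  show _ = _
  simp [list_categorize, list_categorize_alt, list_categorize_fold]
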